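-- pv_equiv track=rewrite | github.com/Manthongkham/UofM-CS1-Lab1 | party_planner.py | plan_party2
-- ===== SOURCE A (Python) =====
-- def plan_party2(f, c, p):
-- 	people = f + 1
-- 	can_need = people * c
-- 	actual_pack = 1
-- 	actual_can = p
--
-- 	while actual_can < can_need:
-- 		actual_pack += 1
-- 		actual_can += p
-- 	return actual_pack                 # Instead of printing the result. We only return a value
-- ===== SOURCE B (Python) =====
-- def plan_party2(f, c, p):
--     need = (f + 1) * c
--     if need <= p:
--         return 1
--     return -(-need // p)
-- ===== Notes on version B (the rewrite author's own statement) =====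
-- stated objective: faster
-- what changed: Replaces the pack-by-pack counting loop with closed-form ceiling division max(1, ceil((f+1)*c/p)).
import Mathlib
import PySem

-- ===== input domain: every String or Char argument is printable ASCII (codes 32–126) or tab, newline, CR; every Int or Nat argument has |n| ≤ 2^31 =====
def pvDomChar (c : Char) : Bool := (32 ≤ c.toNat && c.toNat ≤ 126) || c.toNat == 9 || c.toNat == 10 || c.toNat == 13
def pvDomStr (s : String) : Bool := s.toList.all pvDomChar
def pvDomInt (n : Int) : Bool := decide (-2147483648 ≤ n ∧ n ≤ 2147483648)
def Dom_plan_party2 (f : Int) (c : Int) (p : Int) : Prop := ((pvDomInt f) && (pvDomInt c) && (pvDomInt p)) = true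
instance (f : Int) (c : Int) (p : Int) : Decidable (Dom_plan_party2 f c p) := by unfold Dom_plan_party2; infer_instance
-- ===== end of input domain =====

-- B replaces A's pack-by-pack counting loop with closed-form ceiling division (asymptotically faster).

-- ===== PORT A =====
-- A's while-loop; fuel only makes the recursion total — inside Pre_ it never runs out.
def pvLoopA (fuel : Nat) (can_need : Int) (p : Int) (actual_pack : Int) (actual_can : Int) : Int :=
  match fuel with
  | 0 => actual_pack
  | Nat.succ n =>
      if actual_can < can_need then pvLoopA n can_need p (actual_pack + 1) (actual_can + p)
      else actual_pack

def plan_party2 (f : Int) (c : Int) (p : Int) : Int :=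
  let people := f + 1
  let can_need := people * c
  pvLoopA (2 ^ 63) can_need p 1 p

-- ===== PORT B =====
def plan_party2_alt (f : Int) (c : Int) (p : Int) : Int :=
  let need := (f + 1) * c
  if need ≤ p then 1
  else -(PySem.Int.floordiv (-need) p)

-- ===== PRECONDITION & SPEC =====
-- Pre_ excludes exactly the inputs (p ≤ 0 with (f+1)*c > p) on which A's loop never terminates.
def Pre_plan_party2 (f : Int) (c : Int) (p : Int) : Prop := 0 < p ∨ (f + 1) * c ≤ p
instance (f : Int) (c : Int) (p : Int) : Decidable (Pre_plan_party2 f c p) := by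
  unfold Pre_plan_party2; infer_instance

def pvWitness_plan_party2 : Int × Int × Int := (9, 2, 6)

def Spec_plan_party2 (f : Int) (c : Int) (p : Int) (out : Int) : Prop := out = plan_party2_alt f c p
instance (f : Int) (c : Int) (p : Int) (out : Int) : Decidable (Spec_plan_party2 f c p out) := by
  unfold Spec_plan_party2; infer_instance

-- ===== CLAIM (what is proved, stated in full; the proofs are below) =====
def Claim_equal_plan_party2 : Prop := ∀ (f : Int) (c : Int) (p : Int), Dom_plan_party2 f c p → Pre_plan_party2 f c p → Spec_plan_party2 f c p (plan_party2 f c p)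

-- ===== LEMMAS AND PROOFS =====

theorem pvLoopA_exit (fuel : Nat) (need p pack can : Int) (h : ¬ can < need) :
    pvLoopA fuel need p pack can = pack := by
  cases fuel <;> simp [pvLoopA, h]

theorem pvLoopA_closed (fuel : Nat) (need p : Int) (hp : 0 < p) :
    ∀ (pack can : Int), can < need → need - can ≤ (fuel : Int) * p →
      pvLoopA fuel need p pack can = pack - Int.fdiv (can - need) p := by
  induction fuel with
  | zero => intro pack can h1 h2; simp at h2; omega
  | succ n ih =>
    intro pack can h1 h2
    simp only [pvLoopA, if_pos h1]
    by_cases h3 : can + p < need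
    · rw [ih (pack + 1) (can + p) h3 (by push_cast at h2 ⊢; nlinarith)]
      have : Int.fdiv (can - need + 1 * p) p = Int.fdiv (can - need) p + 1 :=
        Int.add_mul_fdiv_right _ _ (by omega)
      have h4 : can + p - need = can - need + 1 * p := by ring
      rw [h4, this]; ring
    · rw [pvLoopA_exit n need p (pack + 1) (can + p) h3]
      have hmod := Int.mul_fdiv_add_fmod (can - need) p
      have hlo : 0 ≤ Int.fmod (can - need) p := Int.fmod_nonneg_of_pos _ hp
      have hhi := Int.fmod_lt_of_pos (can - need) hp
      have : Int.fdiv (can - need) p = -1 := by nlinarith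
      omega

theorem plan_party2_spec : Claim_equal_plan_party2 := by
  intro f c p hdom hpre
  unfold Spec_plan_party2 plan_party2 plan_party2_alt
  simp only
  set need := (f + 1) * c with hneed
  by_cases hle : need ≤ p
  · rw [if_pos hle, pvLoopA_exit _ _ _ _ _ (by omega)]
  · rw [if_neg hle]
    have hp : 0 < p := by
      rcases hpre with h | h
      · exact h
      · omega
    have hboundf : -2147483648 ≤ f ∧ f ≤ 2147483648 := by
      have := hdom; unfold Dom_plan_party2 pvDomInt at this
      simp only [Bool.and_eq_true, decide_eq_true_eq] at this; exact this.1.1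
    have hboundc : -2147483648 ≤ c ∧ c ≤ 2147483648 := by
      have := hdom; unfold Dom_plan_party2 pvDomInt at this
      simp only [Bool.and_eq_true, decide_eq_true_eq] at this; exact this.1.2
    have hneedbound : need ≤ ((2:Int) ^ 63) := by
      have h1 : need ≤ 2147483649 * 2147483649 := by
        rw [hneed]; nlinarith [hboundf.1, hboundf.2, hboundc.1, hboundc.2]
      omega
    rw [pvLoopA_closed (2 ^ 63) need p hp 1 p (by omega)
        (by push_cast; nlinarith [hneedbound, hp])]
    have : PySem.Int.floordiv (-need) p = Int.fdiv (-need) p := by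
      simp [PySem.Int.floordiv]
    rw [this]
    have h4 : p - need = -need + 1 * p := by ring
    rw [h4, Int.add_mul_fdiv_right _ _ (by omega : p ≠ 0)]
    ring
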